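-- pv_equiv track=rewrite | github.com/vodkar/llm_scanner | llm_scanner/diff_parser.py | _numbers_to_spans
-- ===== SOURCE A (Python) =====
-- def _numbers_to_spans(sorted_lines: list[int]) -> list[tuple[int, int]]:
--     """Merge a sorted list of line numbers into contiguous (start, end) spans."""
--     if not sorted_lines:
--         return []
--     spans: list[tuple[int, int]] = []
--     start = end = sorted_lines[0]
--     for ln in sorted_lines[1:]:
--         if ln == end + 1:
--             end = ln
--         else:
--             spans.append((start, end))
--             start = end = ln
--     spans.append((start, end))
--     return spans
-- ===== SOURCE B (Python) =====
-- def _numbers_to_spans(sorted_lines: list[int]) -> list[tuple[int, int]]: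
--     """Merge a sorted list of line numbers into contiguous (start, end) spans."""
--     if not sorted_lines:
--         return []
--     pairs = list(zip(sorted_lines, sorted_lines[1:]))
--     starts = [sorted_lines[0]] + [b for a, b in pairs if b != a + 1]
--     ends = [a for a, b in pairs if b != a + 1] + [sorted_lines[-1]]
--     return list(zip(starts, ends))
-- ===== Notes on version B (the rewrite author's own statement) =====
-- stated objective: alternative
-- what changed: Replaces A's single loop with a running (start,end) accumulator by a declarative decomposition: zip the list with its tail to find break points (b != a+1), build the start list and end list from them, and zip those into spans.
import Mathlib
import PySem

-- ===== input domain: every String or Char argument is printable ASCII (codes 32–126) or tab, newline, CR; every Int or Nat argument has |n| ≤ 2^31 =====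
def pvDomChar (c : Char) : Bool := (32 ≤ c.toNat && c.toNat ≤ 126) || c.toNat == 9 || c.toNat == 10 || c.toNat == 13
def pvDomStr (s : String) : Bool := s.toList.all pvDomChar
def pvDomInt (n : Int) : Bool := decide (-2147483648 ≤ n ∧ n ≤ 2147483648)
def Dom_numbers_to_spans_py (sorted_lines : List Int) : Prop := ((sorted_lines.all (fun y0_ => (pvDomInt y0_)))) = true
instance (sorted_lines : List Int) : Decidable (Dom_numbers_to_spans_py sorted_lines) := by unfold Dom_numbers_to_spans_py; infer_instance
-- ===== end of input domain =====

-- B replaces A's running start/end accumulator loop by deriving the span boundaries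
-- from adjacent pairs (zip with the tail) and zipping the start list with the end list
-- (objective: alternative decomposition, same O(n) cost).

-- ===== PORT A =====
-- literal port of A: fold over the tail with state (spans, start, end)
def numbers_to_spans_py (sorted_lines : List Int) : List (Int × Int) :=
  match sorted_lines with
  | [] => []
  | x :: rest =>
    let st := rest.foldl
      (fun (st : List (Int × Int) × Int × Int) (ln : Int) =>
        if ln = st.2.2 + 1 then (st.1, st.2.1, ln)
        else (st.1 ++ [(st.2.1, st.2.2)], ln, ln)) ([], x, x)
    st.1 ++ [(st.2.1, st.2.2)]

-- ===== PORT B =====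
-- literal port of Source B: adjacent pairs via zip with the tail (xs[1:]); the match on
-- the nonempty case makes xs[0] and xs[-1] (getLast) exact.
def numbers_to_spans_py_alt (sorted_lines : List Int) : List (Int × Int) :=
  match sorted_lines with
  | [] => []
  | x :: rest =>
    let pairs := (x :: rest).zip rest
    let starts := x :: (pairs.filter (fun p => p.2 ≠ p.1 + 1)).map Prod.snd
    let ends := (pairs.filter (fun p => p.2 ≠ p.1 + 1)).map Prod.fst
      ++ [(x :: rest).getLast (List.cons_ne_nil x rest)]
    starts.zip ends

-- ===== PRECONDITION & SPEC =====
def Spec_numbers_to_spans_py (sorted_lines : List Int) (out : List (Int × Int)) : Prop := out = numbers_to_spans_py_alt sorted_lines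
instance (sorted_lines : List Int) (out : List (Int × Int)) : Decidable (Spec_numbers_to_spans_py sorted_lines out) := by unfold Spec_numbers_to_spans_py; infer_instance

-- ===== CLAIM (what is proved, stated in full; the proofs are below) =====
def Claim_equal_numbers_to_spans_py : Prop := ∀ (sorted_lines : List Int), Dom_numbers_to_spans_py sorted_lines → Spec_numbers_to_spans_py sorted_lines (numbers_to_spans_py sorted_lines)

-- ===== LEMMAS AND PROOFS =====

-- reference recursive description of the span merge
def spansRec (start e : Int) : List Int → List (Int × Int)
  | [] => [(start, e)]
  | ln :: rest => if ln = e + 1 then spansRec start ln rest else (start, e) :: spansRec ln ln rest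

theorem spansRec_shape (rest : List Int) (e s : Int) :
    ∃ b t, spansRec s e rest = (s, b) :: t ∧ ∀ s', spansRec s' e rest = (s', b) :: t := by
  induction rest generalizing e s with
  | nil => exact ⟨e, [], rfl, fun _ => rfl⟩
  | cons ln r ih =>
    by_cases h : ln = e + 1
    · subst h
      obtain ⟨b, t, h1, h2⟩ := ih (e + 1) s
      exact ⟨b, t, by simp [spansRec, h1], fun s' => by simp [spansRec, h2 s']⟩
    · exact ⟨e, spansRec ln ln r, by simp [spansRec, h], fun s' => by simp [spansRec, h]⟩

theorem zip_head_swap {α β : Type} (a a' : α) (b : β) (s : List α) (E : List β) (t : List (α × β))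
    (h : (a :: s).zip E = (a, b) :: t) : (a' :: s).zip E = (a', b) :: t := by
  cases E with
  | nil => simp at h
  | cons e E' =>
    simp only [List.zip_cons_cons] at h ⊢
    rw [List.cons_eq_cons] at h ⊢
    obtain ⟨h1, h2⟩ := h
    have hb : e = b := congrArg Prod.snd h1
    subst hb
    exact ⟨rfl, h2⟩

theorem foldA (rest : List Int) (spans : List (Int × Int)) (start e : Int) :
    (let st := rest.foldl
      (fun (st : List (Int × Int) × Int × Int) (ln : Int) =>
        if ln = st.2.2 + 1 then (st.1, st.2.1, ln)
        else (st.1 ++ [(st.2.1, st.2.2)], ln, ln)) (spans, start, e)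
     st.1 ++ [(st.2.1, st.2.2)]) = spans ++ spansRec start e rest := by
  induction rest generalizing spans start e with
  | nil => simp [spansRec]
  | cons ln r ih =>
    by_cases h : ln = e + 1
    · simpa [spansRec, h] using ih spans start ln
    · simpa [spansRec, h] using ih (spans ++ [(start, e)]) ln ln

theorem altB (rest : List Int) (x : Int) :
    numbers_to_spans_py_alt (x :: rest) = spansRec x x rest := by
  induction rest generalizing x with
  | nil => simp [numbers_to_spans_py_alt, spansRec]
  | cons y r ih =>
    by_cases h : y = x + 1
    · subst h
      obtain ⟨b, t, h1, h2⟩ := spansRec_shape r (x + 1) (x + 1)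
      have hAlt := ih (x + 1)
      simp only [numbers_to_spans_py_alt] at hAlt
      rw [h1] at hAlt
      have hfil : List.filter (fun p : Int × Int => decide (p.2 ≠ p.1 + 1))
          ((x, x + 1) :: (((x + 1) :: r).zip r))
          = List.filter (fun p : Int × Int => decide (p.2 ≠ p.1 + 1)) (((x + 1) :: r).zip r) := by
        simp
      simp only [numbers_to_spans_py_alt, List.zip_cons_cons,
        List.getLast_cons (List.cons_ne_nil (x + 1) r)]
      rw [hfil]
      simp only [spansRec, h2 x]
      exact zip_head_swap (x + 1) x b _ _ _ hAlt
    · have hAlt := ih y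
      simp only [numbers_to_spans_py_alt] at hAlt
      have hfil : List.filter (fun p : Int × Int => decide (p.2 ≠ p.1 + 1))
          ((x, y) :: ((y :: r).zip r))
          = (x, y) :: List.filter (fun p : Int × Int => decide (p.2 ≠ p.1 + 1)) ((y :: r).zip r) := by
        simp [h]
      simp only [numbers_to_spans_py_alt, List.zip_cons_cons,
        List.getLast_cons (List.cons_ne_nil y r)]
      rw [hfil]
      simp only [List.map_cons, List.cons_append, List.zip_cons_cons]
      rw [hAlt]
      simp only [spansRec, if_neg h]

-- ===== VERDICT (by name: the statement is the Claim_ definition above) =====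
theorem numbers_to_spans_py_spec : Claim_equal_numbers_to_spans_py := by
  intro sorted_lines _
  unfold Spec_numbers_to_spans_py
  cases sorted_lines with
  | nil => rfl
  | cons x rest =>
    rw [altB]
    simpa [numbers_to_spans_py] using foldA rest [] x x
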